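-- pv_equiv track=rewrite | github.com/be1a-s/GOA-homeworks | day 084/homework/code/codewars4.py | find_hack
-- ===== SOURCE A (Python) =====
-- def find_hack(arr):
--     result = []
--
--     for name, total, grades in arr:
--         score = 0
--
--         for grade in grades:
--             if grade == "A":
--                 score += 30
--
--             elif grade == "B":
--                 score += 20
--             elif grade == "C":
--                 score += 10
--             elif grade == "D":
--                 score += 5
--
--         if len(grades) >= 5 and all(g in ["A", "B"] for g in grades):
--             score += 20
--
--         score = min(score, 200)
--
--         if score != total:
--             result.append(name)
--
--     return result
-- ===== SOURCE B (Python) =====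
-- def find_hack(arr):
--     result = []
--     for name, total, grades in arr:
--         n = len(grades)
--         a = grades.count("A")
--         b = grades.count("B")
--         score = 30 * a + 20 * b + 10 * grades.count("C") + 5 * grades.count("D")
--         if n >= 5 and a + b == n:
--             score += 20
--         if min(score, 200) != total:
--             result.append(name)
--     return result
-- ===== Notes on version B (the rewrite author's own statement) =====
-- stated objective: simpler
-- what changed: Replaces the per-grade if/elif branch ladder and the all(...) scan with list.count tallies, computing the score by closed arithmetic from the counts and the bonus from countA+countB==len(grades).
import Mathlib
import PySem

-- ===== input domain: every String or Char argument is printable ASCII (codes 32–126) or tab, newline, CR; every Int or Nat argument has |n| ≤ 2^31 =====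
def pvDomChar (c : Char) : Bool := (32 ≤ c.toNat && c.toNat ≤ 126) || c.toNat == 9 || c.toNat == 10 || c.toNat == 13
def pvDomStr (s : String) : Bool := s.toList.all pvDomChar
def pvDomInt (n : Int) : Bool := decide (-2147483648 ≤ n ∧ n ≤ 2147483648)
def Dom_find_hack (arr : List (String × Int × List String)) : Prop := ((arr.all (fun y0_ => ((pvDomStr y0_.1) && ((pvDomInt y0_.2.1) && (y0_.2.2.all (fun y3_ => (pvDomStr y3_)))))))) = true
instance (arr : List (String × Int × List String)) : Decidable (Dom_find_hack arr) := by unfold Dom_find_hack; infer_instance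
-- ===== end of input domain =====

-- B replaces A's per-grade branch ladder with list.count tallies and closed arithmetic (objective: simpler).


-- ===== PORT A =====
def find_hack (arr : List (String × Int × List String)) : List String :=
  arr.foldl (fun result t =>
    let name := t.1
    let total := t.2.1
    let grades := t.2.2
    let score : Int := grades.foldl (fun score grade =>
      if grade == "A" then score + 30
      else if grade == "B" then score + 20
      else if grade == "C" then score + 10
      else if grade == "D" then score + 5
      else score) 0
    let score := if 5 ≤ grades.length ∧ grades.all (fun g => g == "A" || g == "B") then score + 20 else score
    let score := min score 200
    if score ≠ total then result ++ [name] else result) []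

-- ===== PORT B =====
def find_hack_alt (arr : List (String × Int × List String)) : List String :=
  arr.foldl (fun result t =>
    let name := t.1
    let total := t.2.1
    let grades := t.2.2
    let n : Int := grades.length
    let a : Int := PySem.List.count grades "A"
    let b : Int := PySem.List.count grades "B"
    let score : Int := 30 * a + 20 * b + 10 * (PySem.List.count grades "C" : Int)
      + 5 * (PySem.List.count grades "D" : Int)
    let score := if 5 ≤ n ∧ a + b = n then score + 20 else score
    if min score 200 ≠ total then result ++ [name] else result) []

-- ===== PRECONDITION & SPEC =====
def Spec_find_hack (arr : List (String × Int × List String)) (out : List String) : Prop := out = find_hack_alt arr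
instance (arr : List (String × Int × List String)) (out : List String) : Decidable (Spec_find_hack arr out) := by unfold Spec_find_hack; infer_instance

-- ===== CLAIM (what is proved, stated in full; the proofs are below) =====
def Claim_equal_find_hack : Prop := ∀ (arr : List (String × Int × List String)), Dom_find_hack arr → Spec_find_hack arr (find_hack arr)

-- ===== LEMMAS AND PROOFS =====

theorem pv_score_eq (grades : List String) (s : Int) :
    grades.foldl (fun score grade =>
      if grade == "A" then score + 30
      else if grade == "B" then score + 20
      else if grade == "C" then score + 10
      else if grade == "D" then score + 5
      else score) s
    = s + 30 * (grades.count "A" : Int) + 20 * (grades.count "B" : Int)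
        + 10 * (grades.count "C" : Int) + 5 * (grades.count "D" : Int) := by
  induction grades generalizing s with
  | nil => simp
  | cons g gs ih =>
    simp only [List.foldl_cons, ih, List.count_cons]
    by_cases hA : g = "A" <;> by_cases hB : g = "B" <;> by_cases hC : g = "C" <;>
      by_cases hD : g = "D" <;> simp_all <;> ring

theorem pv_cnt_le (gs : List String) : gs.count "A" + gs.count "B" ≤ gs.length := by
  induction gs with
  | nil => simp
  | cons g gs ih =>
    simp only [List.count_cons, List.length_cons]
    by_cases hA : g = "A" <;> by_cases hB : g = "B" <;> simp [hA, hB] <;> omega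

theorem pv_all_eq (grades : List String) :
    (grades.all (fun g => g == "A" || g == "B") = true)
      ↔ ((grades.count "A" : Int) + (grades.count "B" : Int) = (grades.length : Int)) := by
  induction grades with
  | nil => simp
  | cons g gs ih =>
    have hle := pv_cnt_le gs
    by_cases hA : g = "A" <;> by_cases hB : g = "B" <;>
      rw [List.all_cons] <;> simp [hA, hB, ih] <;> omega

theorem pv_elem_eq (r : List String) (t : String × Int × List String) :
    (fun result (t : String × Int × List String) =>
      let name := t.1
      let total := t.2.1
      let grades := t.2.2
      let score : Int := grades.foldl (fun score grade =>
        if grade == "A" then score + 30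
        else if grade == "B" then score + 20
        else if grade == "C" then score + 10
        else if grade == "D" then score + 5
        else score) 0
      let score := if 5 ≤ grades.length ∧ grades.all (fun g => g == "A" || g == "B") then score + 20 else score
      let score := min score 200
      if score ≠ total then result ++ [name] else result) r t
    = (fun result (t : String × Int × List String) =>
      let name := t.1
      let total := t.2.1
      let grades := t.2.2
      let n : Int := grades.length
      let a : Int := PySem.List.count grades "A"
      let b : Int := PySem.List.count grades "B"
      let score : Int := 30 * a + 20 * b + 10 * (PySem.List.count grades "C" : Int)
        + 5 * (PySem.List.count grades "D" : Int)
      let score := if 5 ≤ n ∧ a + b = n then score + 20 else score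
      if min score 200 ≠ total then result ++ [name] else result) r t := by
  obtain ⟨name, total, grades⟩ := t
  have hcond : (5 ≤ grades.length ∧ grades.all (fun g => g == "A" || g == "B") = true)
      ↔ ((5 : Int) ≤ (grades.length : Int)
          ∧ ((grades.count "A" : Int) + (grades.count "B" : Int) = (grades.length : Int))) := by
    rw [← pv_all_eq]
    constructor <;> exact fun h => ⟨by omega, h.2⟩
  simp only [PySem.List.count_eq, pv_score_eq, zero_add]
  rw [if_congr hcond rfl rfl]

-- ===== VERDICT (by name: the statement is the Claim_ definition above) =====
theorem find_hack_spec : Claim_equal_find_hack := by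
  intro arr _
  unfold Spec_find_hack find_hack find_hack_alt
  congr 1
  funext r t
  exact pv_elem_eq r t
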